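-- pv_equiv track=rewrite | github.com/patriciarodrigsc/Bacharelado-em-Ci-ncia-da-Computa-o-IME-USP | 2023/Análise de Algoritmos/LISTA5/Resolucao_A.py | calcula_maneiras
-- ===== SOURCE A (Python) =====
-- import math
--
-- def calcula_maneiras(valor):
--     moedas = []
--     i = 1
--     k = 1
--     moeda_index = 0
--
--     maneiras_pag = [0] * (valor + 1)
--     maneiras_pag[0] = 1
--
--     while k <= valor:
--         k = int(math.pow(i, 3))
--         i = i + 1
--         if k <= valor:
--             moedas.append(k)
--
--     while moeda_index < len(moedas):
--         moeda = moedas[moeda_index]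
--         j = moeda
--         while j <= valor:
--             maneiras_pag[j] = maneiras_pag[j] + maneiras_pag[j - moeda]
--             j = j + 1
--         moeda_index = moeda_index + 1
--
--     return maneiras_pag[valor]
-- ===== SOURCE B (Python) =====
-- def calcula_maneiras(valor):
--     coins = []
--     i = 1
--     while i * i * i <= valor:
--         coins.append(i * i * i)
--         i = i + 1
--
--     def row(k):
--         # table of ways to pay each amount 0..valor using the first k cube coins
--         if k == 0:
--             return [1] + [0] * valor
--         prev = row(k - 1)
--         c = coins[k - 1]
--         cur = []
--         for j in range(valor + 1):
--             cur.append(prev[j] + (cur[j - c] if j >= c else 0))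
--         return cur
--
--     return row(len(coins))[valor]
-- ===== Notes on version B (the rewrite author's own statement) =====
-- stated objective: alternative
-- what changed: Replaces A's in-place single-array while-loop DP with a top-down recursion over the number of allowed cube coins, each step building a fresh row from the previous one; the cube coins are generated by a direct i^3<=valor loop instead of A's lagging k/int(math.pow) loop.
import Mathlib
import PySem

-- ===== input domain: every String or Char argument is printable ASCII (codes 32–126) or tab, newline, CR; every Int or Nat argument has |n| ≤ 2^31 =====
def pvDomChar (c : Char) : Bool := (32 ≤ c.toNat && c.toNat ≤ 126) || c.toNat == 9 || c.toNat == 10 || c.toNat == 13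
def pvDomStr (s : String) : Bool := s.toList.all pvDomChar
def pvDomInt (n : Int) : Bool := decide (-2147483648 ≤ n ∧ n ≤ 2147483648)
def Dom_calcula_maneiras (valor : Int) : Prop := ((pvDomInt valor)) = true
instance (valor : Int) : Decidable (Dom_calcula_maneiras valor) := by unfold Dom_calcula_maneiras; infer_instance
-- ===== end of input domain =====

-- B replaces A's in-place single-array DP (two nested while loops) by a top-down recursion on the
-- number of allowed cube coins, each step building a fresh table row from the previous one;
-- return-value equivalence is proved on all of Pre_ (A raises IndexError on negative valor).
-- Python lists are modelled as Array Int (O(1) index/set/push, like CPython lists).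

-- ===== PORT A =====
-- first while loop of A: i,k lag one step behind; int(math.pow(i,3)) = i*i*i exactly on Dom
-- (|i| ≤ 1291 there, far below 2^53 where float pow is exact); fuel only makes it total.
def pvCubesLoopA (valor : Int) (fuel : Nat) (i k : Int) (moedas : List Int) : List Int :=
  match fuel with
  | 0 => moedas
  | fuel + 1 =>
    if k ≤ valor then
      let k' := i * i * i
      pvCubesLoopA valor fuel (i + 1) k' (if k' ≤ valor then moedas ++ [k'] else moedas)
    else moedas

-- inner while loop of A: maneiras_pag[j] += maneiras_pag[j-moeda]; indices j, j-moeda are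
-- nonnegative and in range whenever Python executes this line, so getD/setIfInBounds are exact there.
def pvInnerA (valor moeda : Int) (j : Int) (dp : Array Int) : Array Int :=
  if h : j ≤ valor then
    pvInnerA valor moeda (j + 1)
      (dp.setIfInBounds j.toNat (dp.getD j.toNat 0 + dp.getD (j - moeda).toNat 0))
  else dp
termination_by (valor + 1 - j).toNat
decreasing_by omega

-- second while loop of A over moeda_index
def pvOuterA (valor : Int) (moedas : List Int) (dp : Array Int) : Array Int :=
  match moedas with
  | [] => dp
  | m :: rest => pvOuterA valor rest (pvInnerA valor m m dp)

def calcula_maneiras (valor : Int) : Int :=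
  let moedas := pvCubesLoopA valor (valor.toNat + 2) 1 1 []
  let dp0 := (Array.replicate (valor + 1).toNat 0).setIfInBounds 0 1
  (pvOuterA valor moedas dp0).getD valor.toNat 0

-- ===== PORT B =====
-- while i*i*i <= valor: coins.append(i*i*i)
def pvCubesB (valor : Int) (i : Nat) (coins : List Int) : List Int :=
  if h : (i : Int) * i * i ≤ valor then
    pvCubesB valor (i + 1) (coins ++ [(i : Int) * i * i])
  else coins
termination_by (valor + 1).toNat - i
decreasing_by
  rcases Nat.eq_zero_or_pos i with h0 | h0
  · subst h0; omega
  · have hi : i ≤ i * i * i := by nlinarith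
    have hi' : (i : Int) ≤ (i : Int) * i * i := by exact_mod_cast hi
    omega

-- for j in range(valor+1): cur.append(prev[j] + (cur[j-c] if j >= c else 0))
def pvRowLoop (valor c : Int) (prev : Array Int) (j : Int) (cur : Array Int) : Array Int :=
  if h : j ≤ valor then
    pvRowLoop valor c prev (j + 1)
      (cur.push (prev.getD j.toNat 0 + (if c ≤ j then cur.getD (j - c).toNat 0 else 0)))
  else cur
termination_by (valor + 1 - j).toNat
decreasing_by omega

-- row(k): table of ways using the first k cube coins
def pvRowB (valor : Int) (coins : List Int) : Nat → Array Int
  | 0 => #[(1 : Int)] ++ Array.replicate valor.toNat 0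
  | k + 1 => pvRowLoop valor (coins.getD k 0) (pvRowB valor coins k) 0 #[]

def calcula_maneiras_alt (valor : Int) : Int :=
  let coins := pvCubesB valor 1 []
  (pvRowB valor coins coins.length).getD valor.toNat 0

-- ===== PRECONDITION & SPEC =====
-- A raises IndexError on negative valor (its ways table is built empty there); Pre_ excludes exactly those inputs.
def Pre_calcula_maneiras (valor : Int) : Prop := 0 ≤ valor
instance (valor : Int) : Decidable (Pre_calcula_maneiras valor) := by
  unfold Pre_calcula_maneiras; infer_instance

def pvWitness_calcula_maneiras : Int := 9

def Spec_calcula_maneiras (valor : Int) (out : Int) : Prop := out = calcula_maneiras_alt valor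
instance (valor : Int) (out : Int) : Decidable (Spec_calcula_maneiras valor out) := by
  unfold Spec_calcula_maneiras; infer_instance

-- ===== CLAIM (what is proved, stated in full; the proofs are below) =====
def Claim_equal_calcula_maneiras : Prop := ∀ (valor : Int), Dom_calcula_maneiras valor → Pre_calcula_maneiras valor → Spec_calcula_maneiras valor (calcula_maneiras valor)

-- ===== LEMMAS AND PROOFS =====

-- bridge: Array.getD is List.getD on toList
theorem arrGetD (a : Array Int) (i : Nat) (d : Int) : a.getD i d = a.toList.getD i d := by
  simp [Array.getD, List.getD_eq_getElem?_getD]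
  split
  · rename_i h; rw [Array.getElem?_eq_getElem h]; rfl
  · rename_i h; rw [Array.getElem?_eq_none (by omega)]; rfl

-- proof-only specification of one DP row: rowSpec c prev j is the first j entries of the row
-- obtained from prev by allowing (unboundedly many copies of) one extra coin c
def rowSpec (c : Int) (prev : List Int) : Nat → List Int
  | 0 => []
  | j + 1 => rowSpec c prev j ++
      [prev.getD j 0 + (if c ≤ (j : Int) then (rowSpec c prev j).getD (j - c.toNat) 0 else 0)]

theorem rowSpec_length (c : Int) (prev : List Int) (j : Nat) : (rowSpec c prev j).length = j := by
  induction j with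
  | zero => rfl
  | succ j ih => simp [rowSpec, ih]

theorem rowSpec_take (c : Int) (prev : List Int) {t j : Nat} (h : t ≤ j) :
    (rowSpec c prev j).take t = rowSpec c prev t := by
  induction j with
  | zero => have : t = 0 := by omega
            subst this; rfl
  | succ j ih =>
    rcases Nat.lt_or_ge t (j + 1) with h1 | h1
    · rw [rowSpec, List.take_append_of_le_length (by rw [rowSpec_length]; omega), ih (by omega)]
    · have ht : t = j + 1 := by omega
      subst ht
      exact List.take_of_length_le (by rw [rowSpec_length])

theorem rowSpec_getD_stable (c : Int) (prev : List Int) {t j j' : Nat}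
    (h : t < j) (h' : t < j') :
    (rowSpec c prev j).getD t 0 = (rowSpec c prev j').getD t 0 := by
  rw [List.getD_eq_getElem?_getD, List.getD_eq_getElem?_getD,
    ← List.getElem?_take_of_lt (l := rowSpec c prev j) (Nat.lt_succ_self t),
    ← List.getElem?_take_of_lt (l := rowSpec c prev j') (Nat.lt_succ_self t),
    rowSpec_take c prev h, rowSpec_take c prev h']

theorem rowSpec_char (c : Int) (prev : List Int) (hc : 1 ≤ c) {t j : Nat} (h : t < j) :
    (rowSpec c prev j).getD t 0 =
      prev.getD t 0 + (if c ≤ (t : Int) then (rowSpec c prev j).getD (t - c.toNat) 0 else 0) := by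
  have e1 : (rowSpec c prev j).getD t 0 = (rowSpec c prev (t + 1)).getD t 0 :=
    rowSpec_getD_stable c prev h (Nat.lt_succ_self t)
  rw [e1, rowSpec, List.getD_eq_getElem?_getD,
    List.getElem?_append_right (by rw [rowSpec_length])]
  rw [rowSpec_length]
  simp only [Nat.sub_self, List.getElem?_cons_zero, Option.getD_some]
  split_ifs with hct
  · congr 1
    exact rowSpec_getD_stable c prev (by omega) (by omega)
  · rfl

theorem rowSpec_getD_low (c : Int) (prev : List Int) (hc : 1 ≤ c) {t j : Nat} (h : t < j)
    (hlow : (t : Int) < c) : (rowSpec c prev j).getD t 0 = prev.getD t 0 := by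
  rw [rowSpec_char c prev hc h, if_neg (by omega), add_zero]

theorem pvRowLoop_eq_rowSpec (valor c : Int) (prev : Array Int) (hv : 0 ≤ valor) (hc : 1 ≤ c) :
    ∀ (j : Int), 0 ≤ j → j ≤ valor + 1 → ∀ (cur : Array Int),
      cur.toList = rowSpec c prev.toList j.toNat →
      (pvRowLoop valor c prev j cur).toList = rowSpec c prev.toList (valor.toNat + 1) := by
  have key : ∀ (n : Nat) (j : Int), (valor + 1 - j).toNat ≤ n → 0 ≤ j → j ≤ valor + 1 →
      ∀ (cur : Array Int), cur.toList = rowSpec c prev.toList j.toNat →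
      (pvRowLoop valor c prev j cur).toList = rowSpec c prev.toList (valor.toNat + 1) := by
    intro n
    induction n with
    | zero =>
      intro j hn h0 h1 cur hcur
      have hj : j = valor + 1 := by omega
      subst hj
      rw [pvRowLoop]
      simp only [dif_neg (by omega : ¬ valor + 1 ≤ valor)]
      rw [hcur]
      congr 1
      omega
    | succ n ih =>
      intro j hn h0 h1 cur hcur
      by_cases hj : j ≤ valor
      · rw [pvRowLoop]
        simp only [dif_pos hj]
        refine ih (j + 1) (by omega) (by omega) (by omega) _ ?_
        rw [Array.toList_push, hcur, arrGetD, arrGetD, hcur,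
          show (j + 1).toNat = j.toNat + 1 from by omega, rowSpec]
        congr 2
        by_cases hcj : c ≤ j
        · rw [if_pos hcj, if_pos (by omega),
            show (j - c).toNat = j.toNat - c.toNat from by omega]
        · rw [if_neg hcj, if_neg (by omega)]
      · have hj' : j = valor + 1 := by omega
        subst hj'
        rw [pvRowLoop]
        simp only [dif_neg (by omega : ¬ valor + 1 ≤ valor)]
        rw [hcur]
        congr 1
        omega
  intro j h0 h1 cur hcur
  exact key (valor + 1 - j).toNat j le_rfl h0 h1 cur hcur

theorem pvInnerA_key (valor c : Int) (prevL : List Int) (hv : 0 ≤ valor) (hc : 1 ≤ c)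
    (hlen : prevL.length = valor.toNat + 1) :
    ∀ (n : Nat) (j : Int), (valor + 1 - j).toNat ≤ n → c ≤ j → j ≤ valor + 1 →
      ∀ (dp : Array Int),
      dp.toList = (rowSpec c prevL (valor.toNat + 1)).take j.toNat ++ prevL.drop j.toNat →
      (pvInnerA valor c j dp).toList = rowSpec c prevL (valor.toNat + 1) := by
  set R := rowSpec c prevL (valor.toNat + 1) with hR
  have hRlen : R.length = valor.toNat + 1 := rowSpec_length c prevL _
  intro n
  induction n with
  | zero =>
    intro j hn hcj hj1 dp hdp
    have hj : j = valor + 1 := by omega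
    subst hj
    rw [pvInnerA]
    simp only [dif_neg (by omega : ¬ valor + 1 ≤ valor)]
    rw [hdp]
    have h1 : (valor + 1).toNat = R.length := by omega
    rw [h1, List.take_length, List.drop_eq_nil_of_le (by omega), List.append_nil]
  | succ n ih =>
    intro j hn hcj hj1 dp hdp
    by_cases hj : j ≤ valor
    · have hjn : j.toNat < valor.toNat + 1 := by omega
      have htl : (R.take j.toNat).length = j.toNat := by
        rw [List.length_take]; omega
      rw [pvInnerA]
      simp only [dif_pos hj]
      have hdL : dp.toList.length = valor.toNat + 1 := by
        rw [hdp, List.length_append, htl, List.length_drop]; omega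
      have a1 : dp.getD j.toNat 0 = prevL.getD j.toNat 0 := by
        rw [arrGetD, hdp, List.getD_eq_getElem?_getD, List.getElem?_append_right (by omega),
          htl, Nat.sub_self, List.getElem?_drop, Nat.add_zero, ← List.getD_eq_getElem?_getD]
      have hm : (j - c).toNat < j.toNat := by omega
      have a2 : dp.getD (j - c).toNat 0 = R.getD (j - c).toNat 0 := by
        rw [arrGetD, hdp, List.getD_eq_getElem?_getD, List.getElem?_append_left (by omega),
          List.getElem?_take_of_lt hm, ← List.getD_eq_getElem?_getD]
      have hval : prevL.getD j.toNat 0 + R.getD (j - c).toNat 0 = R.getD j.toNat 0 := by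
        rw [rowSpec_char c prevL hc (j := valor.toNat + 1) hjn, if_pos (by omega),
          show j.toNat - c.toNat = (j - c).toNat from by omega]
      have hset : (dp.setIfInBounds j.toNat (dp.getD j.toNat 0 + dp.getD (j - c).toNat 0)).toList =
          R.take (j.toNat + 1) ++ prevL.drop (j.toNat + 1) := by
        rw [Array.toList_setIfInBounds, a1, a2, hval, hdp,
          List.set_append_right _ _ (by omega), htl, Nat.sub_self,
          List.drop_eq_getElem_cons (by omega : j.toNat < prevL.length), List.set_cons_zero,
          List.take_add_one, List.getElem?_eq_getElem (by omega : j.toNat < R.length)]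
        simp only [Option.toList_some, List.append_assoc, List.singleton_append]
        rw [List.getD_eq_getElem _ 0 (by omega : j.toNat < R.length)]
      have := ih (j + 1) (by omega) (by omega) (by omega) _ (by
        rw [hset, show (j + 1).toNat = j.toNat + 1 from by omega])
      exact this
    · have hj' : j = valor + 1 := by omega
      subst hj'
      rw [pvInnerA]
      simp only [dif_neg (by omega : ¬ valor + 1 ≤ valor)]
      rw [hdp]
      have h1 : (valor + 1).toNat = R.length := by omega
      rw [h1, List.take_length, List.drop_eq_nil_of_le (by omega), List.append_nil]

theorem pvInnerA_eq_rowSpec (valor c : Int) (dp : Array Int) (hv : 0 ≤ valor) (hc : 1 ≤ c)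
    (hcv : c ≤ valor) (hlen : dp.toList.length = valor.toNat + 1) :
    (pvInnerA valor c c dp).toList = rowSpec c dp.toList (valor.toNat + 1) := by
  have htake : (rowSpec c dp.toList (valor.toNat + 1)).take c.toNat = dp.toList.take c.toNat := by
    apply List.ext_getElem
    · rw [List.length_take, List.length_take, rowSpec_length, hlen]
    · intro m h1 h2
      have hm : m < c.toNat := by
        rw [List.length_take, rowSpec_length] at h1; omega
      rw [List.getElem_take, List.getElem_take,
        ← List.getD_eq_getElem _ 0, ← List.getD_eq_getElem _ 0]
      exact rowSpec_getD_low c dp.toList hc (by omega) (by omega)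
  exact pvInnerA_key valor c dp.toList hv hc hlen (valor + 1 - c).toNat c le_rfl le_rfl
    (by omega) dp (by rw [htake, List.take_append_drop])

theorem pvOuterA_append (valor : Int) (l : List Int) (c : Int) (dp : Array Int) :
    pvOuterA valor (l ++ [c]) dp = pvInnerA valor c c (pvOuterA valor l dp) := by
  induction l generalizing dp with
  | nil => rfl
  | cons m rest ih => simp [pvOuterA, ih]

theorem pvCubesB_mem (valor : Int) :
    ∀ (i : Nat) (acc : List Int), 1 ≤ i →
      ∀ x ∈ pvCubesB valor i acc, x ∈ acc ∨ (1 ≤ x ∧ x ≤ valor) := by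
  intro i acc
  induction i, acc using pvCubesB.induct valor with
  | case1 i acc h ih =>
    intro hi x hx
    rw [pvCubesB, dif_pos h] at hx
    rcases ih (by omega) x hx with hmem | hb
    · rcases List.mem_append.mp hmem with h1 | h1
      · exact Or.inl h1
      · right
        have hx1 : x = (i : Int) * i * i := by simpa using h1
        have hi' : (1 : Int) ≤ (i : Int) := by exact_mod_cast hi
        subst hx1
        exact ⟨by nlinarith, h⟩
    · exact Or.inr hb
  | case2 i acc h =>
    intro hi x hx
    rw [pvCubesB, dif_neg h] at hx
    exact Or.inl hx

theorem pvRowB_eq_outer (valor : Int) (coins : List Int) (hv : 0 ≤ valor)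
    (hmem : ∀ c ∈ coins, 1 ≤ c ∧ c ≤ valor) (dp0 : Array Int)
    (hdp0 : dp0.toList = 1 :: List.replicate valor.toNat 0) :
    ∀ k, k ≤ coins.length →
      (pvRowB valor coins k).toList = (pvOuterA valor (coins.take k) dp0).toList ∧
      (pvRowB valor coins k).toList.length = valor.toNat + 1 := by
  intro k
  induction k with
  | zero =>
    intro _
    constructor
    · show (#[(1 : Int)] ++ Array.replicate valor.toNat 0).toList = _
      simp [pvOuterA, hdp0]
    · simp [pvRowB]
  | succ k ih =>
    intro hk
    obtain ⟨heq, hlen⟩ := ih (by omega)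
    have hkc : k < coins.length := by omega
    have hcval : coins.getD k 0 = coins[k] := List.getD_eq_getElem coins 0 hkc
    obtain ⟨hc1, hc2⟩ := hmem coins[k] (List.getElem_mem hkc)
    have hstep : (pvRowB valor coins (k + 1)).toList =
        rowSpec coins[k] (pvRowB valor coins k).toList (valor.toNat + 1) := by
      rw [pvRowB, hcval]
      exact pvRowLoop_eq_rowSpec valor coins[k] (pvRowB valor coins k) hv hc1 0 le_rfl
        (by omega) #[] rfl
    have htk : coins.take (k + 1) = coins.take k ++ [coins[k]] := by
      rw [List.take_add_one, List.getElem?_eq_getElem hkc]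
      rfl
    refine ⟨?_, by rw [hstep]; exact rowSpec_length _ _ _⟩
    rw [hstep, htk, pvOuterA_append, heq,
      pvInnerA_eq_rowSpec valor coins[k] (pvOuterA valor (coins.take k) dp0) hv hc1 hc2
        (by rw [← heq]; exact hlen), ← heq]

theorem pvCubesA_stop (valor : Int) (fuel : Nat) (i k : Int) (acc : List Int)
    (h : ¬ k ≤ valor) (hf : 1 ≤ fuel) : pvCubesLoopA valor fuel i k acc = acc := by
  match fuel with
  | f + 1 => simp [pvCubesLoopA, h]

theorem pvCubesA_eq_B (valor : Int) :
    ∀ (fuel : Nat) (i k : Int) (acc : List Int), 1 ≤ i → k ≤ valor → i ≤ valor + 1 →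
      valor + 3 ≤ i + fuel → pvCubesLoopA valor fuel i k acc = pvCubesB valor i.toNat acc := by
  intro fuel
  induction fuel with
  | zero => intro i k acc h1 h2 h3 h4; omega
  | succ fuel ih =>
    intro i k acc h1 h2 h3 h4
    have hcast : ((i.toNat : Nat) : Int) = i := by omega
    have hB : pvCubesB valor i.toNat acc =
        if (i : Int) * i * i ≤ valor then
          pvCubesB valor (i.toNat + 1) (acc ++ [(i : Int) * i * i]) else acc := by
      rw [pvCubesB]
      simp only [hcast]
      exact dite_eq_ite
    simp only [pvCubesLoopA, if_pos h2]
    by_cases h5 : i * i * i ≤ valor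
    · have hi' : (1 : Int) ≤ (i : Int) := h1
      have hle : i ≤ valor := by nlinarith
      rw [if_pos h5, ih (i + 1) _ _ (by omega) h5 (by omega) (by omega), hB, if_pos h5]
      congr 1
      omega
    · rw [if_neg h5, pvCubesA_stop valor fuel _ _ _ h5 (by omega), hB, if_neg h5]

theorem coins_eq (valor : Int) (hv : 0 ≤ valor) :
    pvCubesLoopA valor (valor.toNat + 2) 1 1 [] = pvCubesB valor 1 [] := by
  by_cases h1 : (1 : Int) ≤ valor
  · have := pvCubesA_eq_B valor (valor.toNat + 2) 1 1 [] le_rfl h1 (by omega) (by omega)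
    simpa using this
  · have hz : valor = 0 := by omega
    subst hz
    rw [pvCubesB]
    norm_num
    simp [pvCubesLoopA]

-- ===== VERDICT (by name: the statement is the Claim_ definition above) =====
theorem calcula_maneiras_spec : Claim_equal_calcula_maneiras := by
  unfold Claim_equal_calcula_maneiras
  intro valor _ hpre
  have hv : 0 ≤ valor := hpre
  unfold Spec_calcula_maneiras
  have lhs : calcula_maneiras valor =
      (pvOuterA valor (pvCubesLoopA valor (valor.toNat + 2) 1 1 [])
        ((Array.replicate (valor + 1).toNat 0).setIfInBounds 0 1)).getD valor.toNat 0 := rfl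
  have rhs : calcula_maneiras_alt valor =
      (pvRowB valor (pvCubesB valor 1 []) (pvCubesB valor 1 []).length).getD valor.toNat 0 := rfl
  rw [lhs, rhs, coins_eq valor hv]
  have hmem : ∀ c ∈ pvCubesB valor 1 [], 1 ≤ c ∧ c ≤ valor := by
    intro c hcmem
    rcases pvCubesB_mem valor 1 [] le_rfl c hcmem with h | h
    · simp at h
    · exact h
  have hdp0 : ((Array.replicate (valor + 1).toNat 0).setIfInBounds 0 1).toList =
      (1 : Int) :: List.replicate valor.toNat 0 := by
    rw [Array.toList_setIfInBounds, Array.toList_replicate,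
      show (valor + 1).toNat = valor.toNat + 1 from by omega, List.replicate_succ,
      List.set_cons_zero]
  obtain ⟨heq, _⟩ := pvRowB_eq_outer valor (pvCubesB valor 1 []) hv hmem
    ((Array.replicate (valor + 1).toNat 0).setIfInBounds 0 1) hdp0
    (pvCubesB valor 1 []).length le_rfl
  rw [arrGetD, arrGetD, heq, List.take_length]
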